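-- pv_equiv track=rewrite | github.com/danr/kakconf | tree.py | collapse_vertical_whitespace
-- ===== SOURCE A (Python) =====
-- def transpose(xs: list[str]) -> list[str]:
--     return [''.join(t) for t in zip(*xs)]
--
-- def collapse_vertical_whitespace(canvas: list[str]) -> list[str]:
--     cols = transpose(canvas)
--     skip = {
--         i
--         for i, col in enumerate(cols[:-1])
--         if col.isspace() and cols[i+1].isspace()
--     }
--     cols = [col for i, col in enumerate(cols) if i not in skip]
--     return transpose(cols)
-- ===== SOURCE B (Python) =====
-- def collapse_vertical_whitespace(canvas: list[str]) -> list[str]: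
--     # Single right-to-left streaming pass with a one-column lookahead flag,
--     # appending kept characters to per-row accumulators; no transpose, no
--     # column list, no index set.
--     if not canvas:
--         return []
--     n = min(len(row) for row in canvas)
--     if n == 0:
--         return []
--     out = [[] for _ in canvas]
--     next_ws = False
--     for i in range(n - 1, -1, -1):
--         cur_ws = all(row[i].isspace() for row in canvas)
--         if not (cur_ws and next_ws):
--             for o, row in zip(out, canvas):
--                 o.append(row[i])
--         next_ws = cur_ws
--     return [''.join(reversed(o)) for o in out]
-- ===== Notes on version B (the rewrite author's own statement) =====
-- stated objective: alternative
-- what changed: Replaces the transpose/filter-by-index-set/untranspose staging with a single right-to-left streaming pass that carries a one-column whitespace lookahead flag and appends kept characters to per-row accumulators.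
import Mathlib
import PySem

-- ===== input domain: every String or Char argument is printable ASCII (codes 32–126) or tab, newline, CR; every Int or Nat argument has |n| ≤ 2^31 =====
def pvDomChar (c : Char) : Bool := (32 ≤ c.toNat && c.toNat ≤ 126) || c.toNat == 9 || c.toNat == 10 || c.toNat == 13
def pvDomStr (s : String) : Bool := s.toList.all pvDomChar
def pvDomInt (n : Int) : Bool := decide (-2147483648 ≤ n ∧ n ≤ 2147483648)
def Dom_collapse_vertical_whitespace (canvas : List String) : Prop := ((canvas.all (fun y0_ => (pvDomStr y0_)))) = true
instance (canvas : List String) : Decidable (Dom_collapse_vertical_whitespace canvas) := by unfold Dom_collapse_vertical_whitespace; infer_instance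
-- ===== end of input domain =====

-- B replaces A's transpose / filter-by-index-set / untranspose staging with one right-to-left
-- streaming pass carrying a whitespace-lookahead flag; same return value (objective: alternative).

-- ===== PORT A =====
-- zip(*xs) truncates every row to the common (minimum) length; zip() of no rows yields nothing.
def pyMinLen (xs : List (List Char)) : Nat :=
  (PySem.List.min? (xs.map List.length) (fun x => x)).getD 0

-- `[''.join(t) for t in zip(*xs)]`: column i of xs for each i below the minimum row length
-- (the getD default is never reached there).
def transC (xs : List (List Char)) : List (List Char) :=
  (List.range (pyMinLen xs)).map (fun i => xs.map (fun r => r.getD i ' '))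

def pyTranspose (xs : List String) : List String :=
  (transC (xs.map String.toList)).map String.ofList

def collapse_vertical_whitespace (canvas : List String) : List String :=
  let cols := pyTranspose canvas
  let skip : PySem.Set Int :=
    PySem.Set.ofList
      (((PySem.List.enumerate (PySem.List.slice cols none (some (-1)))).filter
          (fun p => PySem.Str.strIsspace p.2 &&
            PySem.Str.strIsspace ((PySem.List.pyGet? cols (p.1 + 1)).getD ""))).map (fun p => p.1))
  let cols2 := ((PySem.List.enumerate cols).filter
      (fun p => !(PySem.Set.contains skip p.1))).map (fun p => p.2)
  pyTranspose cols2

-- ===== PORT B =====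
-- one loop iteration of Source B: cur_ws test, conditional per-row append, carry the flag
def bStep (canvas : List String) (st : List (List Char) × Bool) (i : Nat) : List (List Char) × Bool :=
  let cw := canvas.all (fun row => PySem.Chars.isspace (row.toList.getD i ' '))
  if cw && st.2 then (st.1, cw)
  else (List.zipWith (fun o row => o ++ [row.toList.getD i ' ']) st.1 canvas, cw)

def collapse_vertical_whitespace_alt (canvas : List String) : List String :=
  if canvas = [] then []
  else
    let n : Nat := (PySem.List.min? (canvas.map (fun r => r.toList.length)) (fun x => x)).getD 0
    if n = 0 then []
    else
      -- range(n-1, -1, -1)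
      let st := ((List.range n).reverse).foldl (bStep canvas)
        (canvas.map (fun _ => ([] : List Char)), false)
      st.1.map (fun o => String.ofList o.reverse)

-- ===== PRECONDITION & SPEC =====
def Spec_collapse_vertical_whitespace (canvas : List String) (out : List String) : Prop := out = collapse_vertical_whitespace_alt canvas
instance (canvas : List String) (out : List String) : Decidable (Spec_collapse_vertical_whitespace canvas out) := by unfold Spec_collapse_vertical_whitespace; infer_instance

-- ===== CLAIM (what is proved, stated in full; the proofs are below) =====
def Claim_equal_collapse_vertical_whitespace : Prop := ∀ (canvas : List String), Dom_collapse_vertical_whitespace canvas → Spec_collapse_vertical_whitespace canvas (collapse_vertical_whitespace canvas)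

-- ===== LEMMAS AND PROOFS =====

-- the kept column indices (increasing) produced by the backward loop over [0, m) with
-- incoming lookahead flag b for index m-1
def keepIdxAux (g : Nat → Bool) : Nat → Bool → List Nat
  | 0, _ => []
  | m+1, b => keepIdxAux g m (g m) ++ (if g m && b then [] else [m])

theorem foldl_min_const (m : Nat) : ∀ l : List Nat, (∀ x ∈ l, x = m) → l.foldl min m = m := by
  intro l
  induction l with
  | nil => intro _; rfl
  | cons a t ih =>
    intro h
    have ha : a = m := h a (by simp)
    simp only [List.foldl_cons, ha, min_self]
    exact ih (fun x hx => h x (by simp [hx]))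

theorem enum_range_filter {α : Type} (f : Nat → α) (q : Int × α → Bool) (n : Nat) :
    (PySem.List.enumerate ((List.range n).map f) 0).filter q
      = ((List.range n).filter (fun (j : Nat) => q (↑j, f j))).map (fun (j : Nat) => ((↑j : Int), f j)) := by
  induction n with
  | zero => simp [PySem.List.enumerate_nil]
  | succ n ih =>
    rw [List.range_succ, List.map_append, PySem.List.enumerate_append, List.filter_append, ih,
      List.filter_append, List.map_append]
    simp only [List.length_map, List.length_range, zero_add]
    by_cases h : q ((n : Int), f n) <;> simp [h]

theorem contains_ofList_int (L : List Int) (x : Int) :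
    PySem.Set.contains (PySem.Set.ofList L) x = decide (x ∈ L) := by
  by_cases hx : x ∈ L
  · have : x ∈ PySem.Set.ofList L := (PySem.Set.mem_ofList L x).2 hx
    simp [PySem.Set.contains, this, hx]
  · have : x ∉ PySem.Set.ofList L := fun h => hx ((PySem.Set.mem_ofList L x).1 h)
    simp [PySem.Set.contains, this, hx]

theorem zipWith_zipWith_left {α β γ δ : Type} (f : γ → β → δ) (h : α → β → γ) :
    ∀ (a : List α) (b : List β),
      List.zipWith f (List.zipWith h a b) b = List.zipWith (fun x y => f (h x y) y) a b := by
  intro a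
  induction a with
  | nil => intro b; simp
  | cons x t ih =>
    intro b
    cases b with
    | nil => simp
    | cons y u => simp [ih]

theorem zipWith_self_left {α β : Type} (f : α → β → α) (hf : ∀ x y, f x y = x) :
    ∀ (a : List α) (b : List β), a.length = b.length → List.zipWith f a b = a := by
  intro a
  induction a with
  | nil => intro b _; simp
  | cons x t ih =>
    intro b hb
    cases b with
    | nil => simp at hb
    | cons y u =>
      simp only [List.zipWith_cons_cons, hf]
      rw [ih u (by simpa using hb)]

theorem zipWith_map_left_self {α β : Type} (f : β → α → β) (h : α → β) (l : List α) :
    List.zipWith f (l.map h) l = l.map (fun x => f (h x) x) := by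
  induction l with
  | nil => rfl
  | cons x t ih => simp [ih]

theorem keepIdxAux_eq_filter (g : Nat → Bool) :
    ∀ (m : Nat) (b : Bool),
      keepIdxAux g m b
        = (List.range m).filter (fun j => !(g j && (if j + 1 = m then b else g (j + 1)))) := by
  intro m
  induction m with
  | zero => intro b; rfl
  | succ m ih =>
    intro b
    rw [keepIdxAux, ih (g m), List.range_succ, List.filter_append]
    have h1 : (List.range m).filter (fun j => !(g j && (if j + 1 = m then g m else g (j + 1))))
        = (List.range m).filter (fun j => !(g j && (if j + 1 = m + 1 then b else g (j + 1)))) := by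
      apply List.filter_congr
      intro j hj
      have hjm : j < m := by simpa using hj
      have h3 : j ≠ m := by omega
      by_cases hcase : j + 1 = m
      · subst hcase; simp
      · simp [hcase, h3]
    rw [h1]
    congr 1
    cases hgm : g m <;> cases hbb : b <;> simp [hgm, hbb]

-- the per-column all-whitespace test of Source B's loop
def gws (canvas : List String) (i : Nat) : Bool :=
  canvas.all (fun row => PySem.Chars.isspace (row.toList.getD i ' '))

theorem bStep_eq (canvas : List String) (out : List (List Char)) (b : Bool) (i : Nat) :
    bStep canvas (out, b) i
      = if gws canvas i && b then (out, gws canvas i)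
        else (List.zipWith (fun o row => o ++ [row.toList.getD i ' ']) out canvas, gws canvas i) := rfl

theorem zipWith_ext {α β γ : Type} (f g : α → β → γ) (h : ∀ x y, f x y = g x y) :
    ∀ (a : List α) (b : List β), List.zipWith f a b = List.zipWith g a b := by
  intro a
  induction a with
  | nil => intro b; simp
  | cons x t ih =>
    intro b
    cases b with
    | nil => simp
    | cons y u => simp [h, ih]

theorem bFold_char (canvas : List String) :
    ∀ (m : Nat) (out : List (List Char)) (b : Bool), out.length = canvas.length →
      (((List.range m).reverse).foldl (bStep canvas) (out, b)).1
        = List.zipWith (fun o row => o ++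
            ((keepIdxAux (gws canvas) m b).map
              (fun i => row.toList.getD i ' ')).reverse) out canvas := by
  intro m
  induction m with
  | zero =>
    intro out b hlen
    simp only [List.range_zero, List.reverse_nil, List.foldl_nil, keepIdxAux, List.map_nil,
      List.reverse_nil, List.append_nil]
    exact (zipWith_self_left _ (fun x y => rfl) out canvas hlen).symm
  | succ m ih =>
    intro out b hlen
    have hrev : (List.range (m + 1)).reverse = m :: (List.range m).reverse := by
      rw [List.range_succ]; simp
    rw [hrev, List.foldl_cons, bStep_eq]
    cases hc : (gws canvas m && b) with
    | true =>
      rw [if_pos rfl, ih out (gws canvas m) hlen]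
      have hk : keepIdxAux (gws canvas) (m + 1) b = keepIdxAux (gws canvas) m (gws canvas m) := by
        rw [keepIdxAux, if_pos (by rw [hc]), List.append_nil]
      rw [hk]
    | false =>
      rw [if_neg (by simp)]
      have hlen2 : (List.zipWith (fun o row => o ++ [row.toList.getD m ' ']) out canvas).length
          = canvas.length := by
        simp [List.length_zipWith, hlen]
      rw [ih _ (gws canvas m) hlen2, zipWith_zipWith_left]
      have hk : keepIdxAux (gws canvas) (m + 1) b
          = keepIdxAux (gws canvas) m (gws canvas m) ++ [m] := by
        rw [keepIdxAux, if_neg (by rw [hc]; simp)]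
      rw [hk]
      apply zipWith_ext
      intro o row
      simp [List.map_append, List.reverse_append]

theorem collapse_main (canvas : List String) :
    collapse_vertical_whitespace canvas = collapse_vertical_whitespace_alt canvas := by
  by_cases hc : canvas = []
  · subst hc; rfl
  · have hnB : (PySem.List.min? (canvas.map (fun r => r.toList.length)) (fun x => x)).getD 0
        = pyMinLen (canvas.map String.toList) := by
      simp [pyMinLen, List.map_map, Function.comp_def]
    set C := canvas.map String.toList with hC
    set n := pyMinLen C with hn
    by_cases hn0 : n = 0
    · have hcols : pyTranspose canvas = [] := by
        rw [pyTranspose, transC, ← hC, ← hn, hn0]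
        simp
      have hA : collapse_vertical_whitespace canvas = [] := by
        simp only [collapse_vertical_whitespace, hcols, PySem.List.slice_to_neg_one,
          List.dropLast_nil, PySem.List.enumerate_nil, List.filter_nil, List.map_nil]
        rfl
      have hB : collapse_vertical_whitespace_alt canvas = [] := by
        rw [collapse_vertical_whitespace_alt, if_neg hc]
        simp only [hnB, hn0]
        simp
      rw [hA, hB]
    · obtain ⟨k, hk⟩ : ∃ k, n = k + 1 := ⟨n - 1, by omega⟩
      have hCne : C ≠ [] := by simp [hC, hc]
      set f : Nat → String := fun i => String.ofList (C.map (fun r => r.getD i ' ')) with hf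
      set g : Nat → Bool :=
        fun i => canvas.all (fun row => PySem.Chars.isspace (row.toList.getD i ' ')) with hg
      have hws : ∀ i, PySem.Str.strIsspace (f i) = g i := by
        intro i
        simp only [hf, PySem.Str.strIsspace, PySem.Chars.strIsspace, String.toList_ofList]
        have h1 : (C.map (fun r => r.getD i ' ')).isEmpty = false := by
          simp [List.isEmpty_eq_false_iff, hCne]
        rw [h1]
        simp [hC, List.all_map, Function.comp_def, hg]
      have hcols : pyTranspose canvas = (List.range n).map f := by
        rw [pyTranspose, transC, ← hC, ← hn, List.map_map]
        rfl
      set K : List Nat :=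
        (List.range n).filter (fun i => !(decide (i < n - 1) && g i && g (i + 1))) with hK
      -- A computes pyTranspose (K.map f)
      have hA : collapse_vertical_whitespace canvas = pyTranspose (K.map f) := by
        simp only [collapse_vertical_whitespace, hcols, PySem.List.slice_to_neg_one]
        have hdrop : ((List.range n).map f).dropLast = (List.range k).map f := by
          rw [hk, List.range_succ, List.map_append]
          simp
        rw [hdrop, enum_range_filter, enum_range_filter, List.map_map, List.map_map]
        simp only [Function.comp_def]
        have heta : List.map (fun x : Nat => f x) = List.map f := rfl
        rw [heta]
        refine congrArg (fun l => pyTranspose (List.map f l)) ?_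
        rw [hK]
        apply List.filter_congr
        intro i hi
        have hiN : i < n := by simpa using hi
        rw [contains_ofList_int]
        have hmem : ((i : Int) ∈ (List.filter
              (fun j => PySem.Str.strIsspace (f j) &&
                PySem.Str.strIsspace ((PySem.List.pyGet? (List.map f (List.range n)) ((j : Int) + 1)).getD ""))
              (List.range k)).map (fun (j : Nat) => (j : Int)))
            ↔ (i < n - 1 ∧ (g i && g (i + 1)) = true) := by
          simp only [List.mem_map, List.mem_filter, List.mem_range]
          constructor
          · rintro ⟨j, ⟨hjk, hcond⟩, hji⟩
            have hji' : j = i := by exact_mod_cast hji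
            subst hji'
            have hjy : ((j : Int) + 1) = ((j + 1 : Nat) : Int) := by push_cast; ring
            rw [hjy, PySem.List.pyGet?_natCast] at hcond
            have hj1 : j + 1 < n := by omega
            rw [List.getElem?_map, List.getElem?_range hj1] at hcond
            simp only [Option.map_some, Option.getD_some, hws] at hcond
            exact ⟨by omega, hcond⟩
          · rintro ⟨hik, hgg⟩
            refine ⟨i, ⟨by omega, ?_⟩, rfl⟩
            have hjy : ((i : Int) + 1) = ((i + 1 : Nat) : Int) := by push_cast; ring
            rw [hjy, PySem.List.pyGet?_natCast]
            have hj1 : i + 1 < n := by omega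
            rw [List.getElem?_map, List.getElem?_range hj1]
            simp only [Option.map_some, Option.getD_some, hws]
            exact hgg
        by_cases hP : i < n - 1 ∧ (g i && g (i + 1)) = true
        · have hd : decide _ = true := decide_eq_true (hmem.2 hP)
          rw [hd]
          have h1 : decide (i < n - 1) = true := decide_eq_true hP.1
          simp [h1, hP.2]
        · have hd : decide _ = false := decide_eq_false (fun h => hP (hmem.1 h))
          rw [hd]
          rcases Classical.em (i < n - 1) with hlt | hlt
          · have hgg : (g i && g (i + 1)) = false := by
              rcases Bool.eq_false_or_eq_true (g i && g (i + 1)) with h | h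
              · exact absurd ⟨hlt, h⟩ hP
              · exact h
            simp [hlt, hgg]
          · simp [hlt]
      -- B's backward streaming loop computes canvas.map (row restricted to K)
      have hB : collapse_vertical_whitespace_alt canvas
          = canvas.map (fun row => String.ofList (K.map (fun i => row.toList.getD i ' '))) := by
        rw [collapse_vertical_whitespace_alt, if_neg hc]
        simp only [hnB, ← hn, if_neg hn0]
        rw [bFold_char canvas n (canvas.map (fun _ => ([] : List Char))) false (by simp)]
        have hgws : gws canvas = g := rfl
        rw [hgws]
        have hKeq : keepIdxAux g n false = K := by
          rw [keepIdxAux_eq_filter, hK]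
          apply List.filter_congr
          intro j hj
          have hjn : j < n := by simpa using hj
          by_cases hb : j + 1 = n
          · have h2 : decide (j < n - 1) = false := by rw [decide_eq_false]; omega
            simp [hb, h2]
          · have h2 : decide (j < n - 1) = true := by rw [decide_eq_true]; omega
            simp [hb, h2, Bool.and_assoc]
        rw [hKeq, zipWith_map_left_self]
        rw [List.map_map]
        apply List.map_congr_left
        intro row _
        simp [Function.comp_def]
      -- the final transpose equals the row map
      have hKne : K ≠ [] := by
        have : k ∈ K := by
          rw [hK]
          refine List.mem_filter.2 ⟨by simp [hk], ?_⟩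
          have : decide (k < n - 1) = false := by
            rw [decide_eq_false]; omega
          simp [this]
        exact fun h => by simp [h] at this
      have hfinal : pyTranspose (K.map f)
          = canvas.map (fun row => String.ofList (K.map (fun i => row.toList.getD i ' '))) := by
        rw [pyTranspose]
        have h1 : (K.map f).map String.toList = K.map (fun i => C.map (fun r => r.getD i ' ')) := by
          simp [List.map_map, hf, Function.comp]
        rw [h1]
        have hm : pyMinLen (K.map (fun i => C.map (fun r => r.getD i ' '))) = canvas.length := by
          obtain ⟨k0, K', hK'⟩ : ∃ k0 K', K = k0 :: K' := by
            cases hKK : K with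
            | nil => exact absurd hKK hKne
            | cons a t => exact ⟨a, t, rfl⟩
          rw [hK', pyMinLen, List.map_map]
          simp only [Function.comp_def, List.length_map, List.map_cons]
          rw [PySem.List.min?_id_cons]
          have : (K'.map (fun _ => C.length)).foldl min C.length = C.length := by
            apply foldl_min_const
            intro x hx
            rcases List.mem_map.1 hx with ⟨y, _, hy⟩
            exact hy.symm
          rw [this]
          simp [hC]
        rw [transC, hm]
        apply List.ext_getElem
        · simp
        · intro j h1j h2j
          simp only [List.getElem_map, List.getElem_range, List.map_map, Function.comp_def]
          congr 1
          apply List.map_congr_left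
          intro i _
          have hjlen : j < canvas.length := by simpa using h2j
          rw [List.getD_eq_getElem?_getD, List.getElem?_map]
          rw [hC, List.getElem?_map, List.getElem?_eq_getElem hjlen]
          simp
      rw [hA, hB, hfinal]

-- ===== VERDICT (by name: the statement is the Claim_ definition above) =====
theorem collapse_vertical_whitespace_spec : Claim_equal_collapse_vertical_whitespace := by
  intro canvas _
  exact collapse_main canvas
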